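-- pv_equiv track=rewrite | github.com/pypi-data/pypi-mirror-385 | packages/niti/niti-0.2.9-py3-none-any.whl/niti/rules/types.py | _remove_string_literals
-- ===== SOURCE A (Python) =====
-- def _remove_string_literals(line: str) -> str:
--     """Remove string literals from a line to avoid false positives in comment detection."""
--     result = []
--     in_string = False
--     escape_next = False
--
--     for char in line:
--         if escape_next:
--             result.append(' ')  # Replace escaped char with space
--             escape_next = False
--             continue
--
--         if char == '\\' and in_string:
--             escape_next = True
--             result.append(' ')
--             continue
--
--         if char == '"':
--             in_string = not in_string
--             result.append(' ')  # Replace quotes with space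
--         elif in_string:
--             result.append(' ')  # Replace string content with space
--         else:
--             result.append(char)
--
--     return ''.join(result)
-- ===== SOURCE B (Python) =====
-- def _remove_string_literals(line: str) -> str:
--     """Remove string literals from a line to avoid false positives in comment detection."""
--     out = []
--     i = 0
--     n = len(line)
--     while i < n:
--         ch = line[i]
--         if ch != '"':
--             out.append(ch)
--             i += 1
--             continue
--         # opening quote: blank everything through the closing quote
--         out.append(' ')
--         i += 1
--         while i < n:
--             c = line[i]
--             if c == '"':
--                 out.append(' ')
--                 i += 1
--                 break
--             if c == '\\':
--                 out.append(' ')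
--                 i += 1
--                 if i < n:
--                     out.append(' ')
--                     i += 1
--             else:
--                 out.append(' ')
--                 i += 1
--     return ''.join(out)
-- ===== Notes on version B (the rewrite author's own statement) =====
-- stated objective: alternative
-- what changed: Replaces A's flat single pass with in_string/escape_next flags by an index-style scan whose outer loop copies code verbatim and whose nested inner loop blanks each string literal whole, consuming escaped pairs two characters at a time.
import Mathlib
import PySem

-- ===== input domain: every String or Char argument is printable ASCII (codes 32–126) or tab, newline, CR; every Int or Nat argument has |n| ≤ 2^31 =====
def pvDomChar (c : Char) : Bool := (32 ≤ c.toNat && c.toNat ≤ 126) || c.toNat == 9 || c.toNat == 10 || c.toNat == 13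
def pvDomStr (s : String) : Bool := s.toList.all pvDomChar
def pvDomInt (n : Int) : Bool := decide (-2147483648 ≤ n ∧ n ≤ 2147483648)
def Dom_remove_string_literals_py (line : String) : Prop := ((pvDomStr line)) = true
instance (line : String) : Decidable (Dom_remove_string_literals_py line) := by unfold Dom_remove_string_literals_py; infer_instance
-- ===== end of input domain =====

-- B replaces A's flat flag-tracking scan with an index-style scan whose nested inner
-- loop consumes each string literal whole (objective: alternative decomposition, same O(n) cost).

-- ===== PORT A =====
-- A's loop body: state is (result, in_string, escape_next), result appended in order.
def pvStepA (st : List Char × Bool × Bool) (c : Char) : List Char × Bool × Bool :=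
  match st with
  | (res, inS, esc) =>
    if esc then (res ++ [' '], inS, false)
    else if c = '\\' ∧ inS then (res ++ [' '], inS, true)
    else if c = '"' then (res ++ [' '], !inS, false)
    else if inS then (res ++ [' '], inS, false)
    else (res ++ [c], inS, false)

def remove_string_literals_py (line : String) : String :=
  String.ofList (line.toList.foldl pvStepA ([], false, false)).1

-- ===== PORT B =====
-- B's outer while-loop: copy chars verbatim; on '"' emit a space and enter the inner loop.
-- B's inner while-loop: one space per char of the literal; closing quote exits; a backslash
-- consumes the following char too (two spaces); at end-of-line it just finishes.
mutual
def pvOuterB : List Char → List Char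
  | [] => []
  | c :: rest => if c = '"' then ' ' :: pvInnerB rest else c :: pvOuterB rest
def pvInnerB : List Char → List Char
  | [] => []
  | c :: rest =>
    if c = '"' then ' ' :: pvOuterB rest
    else if c = '\\' then
      match rest with
      | [] => [' ']
      | _ :: rest' => ' ' :: ' ' :: pvInnerB rest'
    else ' ' :: pvInnerB rest
end

def remove_string_literals_py_alt (line : String) : String :=
  String.ofList (pvOuterB line.toList)

-- ===== PRECONDITION & SPEC =====
def Spec_remove_string_literals_py (line : String) (out : String) : Prop := out = remove_string_literals_py_alt line
instance (line : String) (out : String) : Decidable (Spec_remove_string_literals_py line out) := by unfold Spec_remove_string_literals_py; infer_instance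

-- ===== CLAIM (what is proved, stated in full; the proofs are below) =====
def Claim_equal_remove_string_literals_py : Prop := ∀ (line : String), Dom_remove_string_literals_py line → Spec_remove_string_literals_py line (remove_string_literals_py line)

-- ===== LEMMAS AND PROOFS =====

-- recursive characterization of A's fold (proof-only helper)
def pvGoA : Bool → Bool → List Char → List Char
  | _, _, [] => []
  | s, e, c :: rest =>
    if e then ' ' :: pvGoA s false rest
    else if c = '\\' ∧ s then ' ' :: pvGoA s true rest
    else if c = '"' then ' ' :: pvGoA (!s) false rest
    else if s then ' ' :: pvGoA s false rest
    else c :: pvGoA s false rest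

theorem pvFoldA_go (l : List Char) : ∀ (acc : List Char) (s e : Bool),
    (l.foldl pvStepA (acc, s, e)).1 = acc ++ pvGoA s e l := by
  induction l with
  | nil => intro acc s e; simp [pvGoA]
  | cons c rest ih =>
    intro acc s e
    simp only [List.foldl_cons, pvStepA, pvGoA]
    split_ifs with h1 h2 h3 h4 <;> simp [ih]

theorem pvOuterB_nil : pvOuterB [] = [] := by rw [pvOuterB.eq_def]
theorem pvOuterB_cons (c : Char) (rest : List Char) :
    pvOuterB (c :: rest) = if c = '"' then ' ' :: pvInnerB rest else c :: pvOuterB rest := by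
  rw [pvOuterB.eq_def]
theorem pvInnerB_nil : pvInnerB [] = [] := by rw [pvInnerB.eq_def]
theorem pvInnerB_cons (c : Char) (rest : List Char) :
    pvInnerB (c :: rest) =
      if c = '"' then ' ' :: pvOuterB rest
      else if c = '\\' then
        (match rest with | [] => [' '] | _ :: rest' => ' ' :: ' ' :: pvInnerB rest')
      else ' ' :: pvInnerB rest := by
  rw [pvInnerB.eq_def]

theorem pvGoA_eq (n : ℕ) : ∀ (l : List Char), l.length ≤ n →
    pvGoA false false l = pvOuterB l ∧ pvGoA true false l = pvInnerB l := by
  induction n with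
  | zero =>
    intro l hl
    have : l = [] := List.eq_nil_of_length_eq_zero (Nat.le_zero.mp hl)
    subst this; exact ⟨pvOuterB_nil.symm, pvInnerB_nil.symm⟩
  | succ n ih =>
    intro l hl
    cases l with
    | nil => exact ⟨pvOuterB_nil.symm, pvInnerB_nil.symm⟩
    | cons c rest =>
      have hr : rest.length ≤ n := Nat.lt_succ_iff.mp (by simpa using hl)
      constructor
      · by_cases hq : c = '"'
        · simp [pvGoA, pvOuterB_cons, hq, (ih rest hr).2]
        · by_cases hb : c = '\\' <;>
            simp [pvGoA, pvOuterB_cons, hq, hb, (ih rest hr).1]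
      · by_cases hq : c = '"'
        · simp [pvGoA, pvInnerB_cons, hq, (ih rest hr).1]
        · by_cases hb : c = '\\'
          · cases rest with
            | nil => simp [pvGoA, pvInnerB_cons, hb]
            | cons d rest' =>
              have hr' : rest'.length ≤ n := by
                have := hr; simp at this; omega
              simp [pvGoA, pvInnerB_cons, hb, (ih rest' hr').2]
          · simp [pvGoA, pvInnerB_cons, hq, hb, (ih rest hr).2]

-- ===== VERDICT (by name: the statement is the Claim_ definition above) =====
theorem remove_string_literals_py_spec : Claim_equal_remove_string_literals_py := by
  intro line _
  unfold Spec_remove_string_literals_py remove_string_literals_py remove_string_literals_py_alt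
  rw [pvFoldA_go, (pvGoA_eq line.toList.length line.toList le_rfl).1]
  simp
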